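-- pv_equiv track=rewrite | github.com/FuntestechGithub/algorithm | 数据类型/二维数组/二维数组找3x3子数组最小和.py | find_min_sum_subarray
-- ===== SOURCE A (Python) =====
-- def find_min_sum_subarray(matrix):
--     rows = len(matrix)
--     cols = len(matrix[0])
--
--     if rows < 3 or cols < 3:
--         return None
--
--     # Create a DP array to store the cumulative sum
--     dp = [[0] * (cols + 1) for _ in range(rows + 1)]
--
--     # Calculate cumulative sum
--     for i in range(1, rows + 1):
--         for j in range(1, cols + 1):
--             dp[i][j] = matrix[i - 1][j - 1] + dp[i - 1][j] + dp[i][j - 1] - dp[i - 1][j - 1]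
--
--     min_sum = float('inf')
--     min_subarray = None
--
--     for i in range(3, rows + 1):  # Rows of the 3x3 subarray
--         for j in range(3, cols + 1):  # Columns of the 3x3 subarray
--             current_sum = dp[i][j] - dp[i - 3][j] - dp[i][j - 3] + dp[i - 3][j - 3]
--
--             if current_sum < min_sum:
--                 min_sum = current_sum
--
--
--     return min_sum
-- ===== SOURCE B (Python) =====
-- def find_min_sum_subarray(matrix):
--     rows = len(matrix)
--     cols = len(matrix[0])
--     if rows < 3 or cols < 3:
--         return None
--     return min(
--         sum(matrix[i + di][j + dj] for di in range(3) for dj in range(3))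
--         for i in range(rows - 2)
--         for j in range(cols - 2)
--     )
-- ===== Notes on version B (the rewrite author's own statement) =====
-- stated objective: simpler
-- what changed: Drops the (rows+1)x(cols+1) prefix-sum table and the inclusion-exclusion lookups; B sums the nine elements of each 3x3 window directly and takes min() over all window sums.
import Mathlib
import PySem

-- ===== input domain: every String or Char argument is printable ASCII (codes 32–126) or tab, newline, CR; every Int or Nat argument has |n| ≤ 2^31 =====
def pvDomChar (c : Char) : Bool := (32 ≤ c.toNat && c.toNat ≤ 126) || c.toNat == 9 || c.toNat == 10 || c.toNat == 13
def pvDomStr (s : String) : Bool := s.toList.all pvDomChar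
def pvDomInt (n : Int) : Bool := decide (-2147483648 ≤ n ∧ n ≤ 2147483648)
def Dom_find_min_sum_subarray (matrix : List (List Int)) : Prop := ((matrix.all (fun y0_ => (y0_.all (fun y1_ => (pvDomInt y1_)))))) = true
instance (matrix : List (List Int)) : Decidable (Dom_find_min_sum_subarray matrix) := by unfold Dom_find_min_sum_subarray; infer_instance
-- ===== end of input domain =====

-- B drops A's (rows+1)x(cols+1) prefix-sum table and its inclusion-exclusion lookups and instead
-- sums the nine elements of each 3x3 window directly, taking min() over all window sums (objective: simpler).

-- ===== PORT A =====
-- A-side helpers: reads/writes of the mutable dp table (plain list indexing; under Pre_ every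
-- index that A dereferences is in range, so the getD default 0 is never taken).
def dpGet (dp : List (List Int)) (i j : Nat) : Int := (dp.getD i []).getD j 0
def dpSet (dp : List (List Int)) (i j : Nat) (v : Int) : List (List Int) :=
  dp.set i ((dp.getD i []).set j v)
-- body of the inner dp loop: dp[i][j] = matrix[i-1][j-1] + dp[i-1][j] + dp[i][j-1] - dp[i-1][j-1]
def dpStep (m : List (List Int)) (i : Nat) (dp : List (List Int)) (j : Nat) : List (List Int) :=
  dpSet dp i j ((m.getD (i - 1) []).getD (j - 1) 0
    + dpGet dp (i - 1) j + dpGet dp i (j - 1) - dpGet dp (i - 1) (j - 1))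
-- the min_sum accumulator: none plays float('inf'), then 'if current_sum < min_sum'
def minStep (ms : Option Int) (cur : Int) : Option Int :=
  match ms with
  | none => some cur
  | some m => if cur < m then some cur else some m

def find_min_sum_subarray (matrix : List (List Int)) : Option Int :=
  let rows := matrix.length
  let cols := (matrix.headD []).length
  if rows < 3 ∨ cols < 3 then none
  else
    let dp0 : List (List Int) := List.replicate (rows + 1) (List.replicate (cols + 1) 0)
    let dp := (List.range' 1 rows).foldl (fun dp i =>
      (List.range' 1 cols).foldl (dpStep matrix i) dp) dp0
    (List.range' 3 (rows - 2)).foldl (fun ms i =>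
      (List.range' 3 (cols - 2)).foldl (fun ms j =>
        minStep ms (dpGet dp i j - dpGet dp (i - 3) j - dpGet dp i (j - 3)
          + dpGet dp (i - 3) (j - 3))) ms) none

-- ===== PORT B =====
-- sum of the nine elements of the 3x3 window with top-left corner (i, j)
def windowSum (matrix : List (List Int)) (i j : Nat) : Int :=
  ((List.range 3).flatMap (fun di => (List.range 3).map (fun dj =>
    (matrix.getD (i + di) []).getD (j + dj) 0))).sum

def find_min_sum_subarray_alt (matrix : List (List Int)) : Option Int :=
  let rows := matrix.length
  let cols := (matrix.headD []).length
  if rows < 3 ∨ cols < 3 then none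
  else
    PySem.List.min? ((List.range (rows - 2)).flatMap (fun i =>
      (List.range (cols - 2)).map (fun j => windowSum matrix i j))) (fun x => x)

-- ===== PRECONDITION & SPEC =====
-- Pre_ excludes exactly the inputs where Python A raises IndexError: the empty matrix
-- (on matrix[0]), and matrices with ≥3 rows whose first row has length ≥3 in which some row is
-- shorter than the first (on matrix[i-1][j-1] during the dp build).
def Pre_find_min_sum_subarray (matrix : List (List Int)) : Prop :=
  matrix ≠ [] ∧ (matrix.length < 3 ∨ (matrix.headD []).length < 3 ∨
    ∀ row ∈ matrix, (matrix.headD []).length ≤ row.length)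
instance (matrix : List (List Int)) : Decidable (Pre_find_min_sum_subarray matrix) := by
  unfold Pre_find_min_sum_subarray; infer_instance
def pvWitness_find_min_sum_subarray : List (List Int) := [[1, 2, 3], [4, 5, 6], [7, 8, 9]]

def Spec_find_min_sum_subarray (matrix : List (List Int)) (out : Option Int) : Prop := out = find_min_sum_subarray_alt matrix
instance (matrix : List (List Int)) (out : Option Int) : Decidable (Spec_find_min_sum_subarray matrix out) := by unfold Spec_find_min_sum_subarray; infer_instance

-- ===== CLAIM (what is proved, stated in full; the proofs are below) =====
def Claim_equal_find_min_sum_subarray : Prop := ∀ (matrix : List (List Int)), Dom_find_min_sum_subarray matrix → Pre_find_min_sum_subarray matrix → Spec_find_min_sum_subarray matrix (find_min_sum_subarray matrix)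

-- ===== LEMMAS AND PROOFS =====

-- proof-side abbreviations: matrix entry read, row prefix sum, 2-d prefix sum
def mget (m : List (List Int)) (a b : Nat) : Int := (m.getD a []).getD b 0
def rowSum (m : List (List Int)) (a j : Nat) : Int := ((List.range j).map (fun b => mget m a b)).sum
def Ps (m : List (List Int)) (i j : Nat) : Int := ((List.range i).map (fun a => rowSum m a j)).sum
-- rows of dp are [] (out of range) or of length C+1
def Shape (C : Nat) (dp : List (List Int)) : Prop :=
  ∀ a, (dp.getD a []).length = 0 ∨ (dp.getD a []).length = C + 1

theorem getD_dpSet (dp : List (List Int)) (i j a : Nat) (v : Int) :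
    (dpSet dp i j v).getD a [] =
      if a = i then (dp.getD i []).set j v else dp.getD a [] := by
  simp only [dpSet, List.getD_eq_getElem?_getD, List.getElem?_set]
  by_cases h : a = i
  · subst h
    by_cases hl : a < dp.length
    · simp [hl]
    · have h1 : dp[a]? = none := List.getElem?_eq_none (by omega)
      rw [if_neg hl]
      simp [h1]
  · simp [h, Ne.symm h]

theorem dpGet_dpSet_eq (dp : List (List Int)) (i j : Nat) (v : Int)
    (h : j < (dp.getD i []).length) :
    dpGet (dpSet dp i j v) i j = v := by
  unfold dpGet
  rw [getD_dpSet, if_pos rfl]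
  simp only [List.getD_eq_getElem?_getD] at h ⊢
  simp [h]

theorem dpGet_dpSet_ne (dp : List (List Int)) (i j a b : Nat) (v : Int)
    (h : a ≠ i ∨ b ≠ j) :
    dpGet (dpSet dp i j v) a b = dpGet dp a b := by
  unfold dpGet
  rw [getD_dpSet]
  by_cases ha : a = i
  · subst ha
    have hb : b ≠ j := by tauto
    simp [List.getD_eq_getElem?_getD, Ne.symm hb]
  · rw [if_neg ha]

theorem shape_dpSet (C : Nat) (dp : List (List Int)) (i j : Nat) (v : Int)
    (h : Shape C dp) : Shape C (dpSet dp i j v) := by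
  intro a
  rw [getD_dpSet]
  split
  · simpa using h i
  · exact h a

theorem rowSum_succ (m : List (List Int)) (a b : Nat) :
    rowSum m a (b + 1) = rowSum m a b + mget m a b := by
  simp [rowSum, List.range_succ]

theorem Ps_succ (m : List (List Int)) (i j : Nat) :
    Ps m (i + 1) j = Ps m i j + rowSum m i j := by
  simp [Ps, List.range_succ]

theorem Ps_zero_right (m : List (List Int)) (i : Nat) : Ps m i 0 = 0 := by
  simp [Ps, rowSum]

theorem Ps_recur (m : List (List Int)) (a b : Nat) :
    Ps m (a + 1) (b + 1) =
      mget m a b + Ps m a (b + 1) + Ps m (a + 1) b - Ps m a b := by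
  rw [Ps_succ, Ps_succ, rowSum_succ]; ring

-- a 3x3 window sum by inclusion-exclusion on the 2-d prefix sums
theorem window_eq (m : List (List Int)) (a b : Nat) :
    Ps m (a + 3) (b + 3) - Ps m a (b + 3) - Ps m (a + 3) b + Ps m a b
      = windowSum m a b := by
  have e3 : (3:Nat) = 2 + 1 := rfl
  have e2 : (2:Nat) = 1 + 1 := rfl
  have w : windowSum m a b =
      mget m a b + mget m a (b+1) + mget m a (b+2)
      + mget m (a+1) b + mget m (a+1) (b+1) + mget m (a+1) (b+2)
      + mget m (a+2) b + mget m (a+2) (b+1) + mget m (a+2) (b+2) := by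
    simp [windowSum, mget, e3, e2, List.range_succ]
    ring
  rw [w]
  rw [show a + 3 = (a+2)+1 from rfl, show b + 3 = (b+2)+1 from rfl,
      show (a+2 : Nat) = (a+1)+1 from rfl, show (b+2 : Nat) = (b+1)+1 from rfl]
  simp only [Ps_succ, rowSum_succ]
  ring

-- inner loop invariant: processing row a+1 writes the prefix sums into columns 1..t of that row
theorem inner_inv (m : List (List Int)) (C a t : Nat)(dp : List (List Int))
    (hsh : Shape C dp) (htC : t ≤ C)
    (hrow : (dp.getD (a + 1) []).length = C + 1)
    (hprev : ∀ b, b ≤ C → dpGet dp a b = Ps m a b)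
    (hcur : ∀ b, dpGet dp (a + 1) b = 0) :
    Shape C ((List.range' 1 t).foldl (dpStep m (a + 1)) dp) ∧
    (∀ x y, x ≠ a + 1 → dpGet ((List.range' 1 t).foldl (dpStep m (a + 1)) dp) x y = dpGet dp x y) ∧
    (∀ b, b ≤ t → dpGet ((List.range' 1 t).foldl (dpStep m (a + 1)) dp) (a + 1) b = Ps m (a + 1) b) ∧
    (∀ b, t < b → dpGet ((List.range' 1 t).foldl (dpStep m (a + 1)) dp) (a + 1) b = 0) ∧
    (∀ x, ((((List.range' 1 t).foldl (dpStep m (a + 1)) dp)).getD x []).length = (dp.getD x []).length) := by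
  induction t with
  | zero =>
    refine ⟨hsh, fun _ _ _ => rfl, ?_, fun b _ => hcur b, fun _ => rfl⟩
    intro b hb
    interval_cases b
    show dpGet dp (a + 1) 0 = Ps m (a + 1) 0
    rw [hcur 0, Ps_zero_right]
  | succ t ih =>
    obtain ⟨ih1, ih2, ih3, ih4, ih5⟩ := ih (by omega)
    rw [List.range'_1_concat, List.foldl_append]
    set dpT := (List.range' 1 t).foldl (dpStep m (a + 1)) dp with hdpT
    simp only [List.foldl_cons, List.foldl_nil]
    have hstep : dpStep m (a + 1) dpT (1 + t) =
        dpSet dpT (a + 1) (1 + t) (mget m a t + dpGet dpT a (1 + t) + dpGet dpT (a + 1) t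
          - dpGet dpT a t) := by
      have e1 : a + 1 - 1 = a := by omega
      have e2 : 1 + t - 1 = t := by omega
      simp only [dpStep, e1, e2, mget]
    rw [hstep]
    have hval : mget m a t + dpGet dpT a (1 + t) + dpGet dpT (a + 1) t - dpGet dpT a t
        = Ps m (a + 1) (t + 1) := by
      rw [ih2 a (1 + t) (by omega), ih2 a t (by omega),
          ih3 t (le_refl t),
          hprev (1 + t) (by omega), hprev t (by omega),
          show 1 + t = t + 1 from by omega, Ps_recur]
    rw [hval]
    refine ⟨shape_dpSet _ _ _ _ _ ih1, ?_, ?_, ?_, ?_⟩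
    · intro x y hx
      rw [dpGet_dpSet_ne _ _ _ _ _ _ (Or.inl hx)]
      exact ih2 x y hx
    · intro b hb
      by_cases hbt : b = t + 1
      · subst hbt
        have : (1 : Nat) + t = t + 1 := by omega
        rw [← this, dpGet_dpSet_eq]
        rw [ih5 (a + 1), hrow]; omega
      · rw [dpGet_dpSet_ne _ _ _ _ _ _ (Or.inr (by omega))]
        exact ih3 b (by omega)
    · intro b hb
      rw [dpGet_dpSet_ne _ _ _ _ _ _ (Or.inr (by omega))]
      exact ih4 b (by omega)
    · intro x
      rw [getD_dpSet]
      by_cases hx : x = a + 1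
      · rw [if_pos hx, List.length_set, hx, ih5 (a + 1)]
      · rw [if_neg hx, ih5 x]

-- outer loop invariant: after k rows, rows 0..k of dp hold the 2-d prefix sums, the rest is 0
theorem outer_inv (m : List (List Int)) (R C k : Nat) (hk : k ≤ R) :
    Shape C ((List.range' 1 k).foldl (fun dp i => (List.range' 1 C).foldl (dpStep m i) dp)
      (List.replicate (R + 1) (List.replicate (C + 1) (0 : Int)))) ∧
    (∀ a, a ≤ k → ∀ b, b ≤ C → dpGet ((List.range' 1 k).foldl (fun dp i => (List.range' 1 C).foldl (dpStep m i) dp)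
      (List.replicate (R + 1) (List.replicate (C + 1) (0 : Int)))) a b = Ps m a b) ∧
    (∀ a, k < a → ∀ b, dpGet ((List.range' 1 k).foldl (fun dp i => (List.range' 1 C).foldl (dpStep m i) dp)
      (List.replicate (R + 1) (List.replicate (C + 1) (0 : Int)))) a b = 0) ∧
    (∀ a, a ≤ R → (((List.range' 1 k).foldl (fun dp i => (List.range' 1 C).foldl (dpStep m i) dp)
      (List.replicate (R + 1) (List.replicate (C + 1) (0 : Int)))).getD a []).length = C + 1) := by
  have hget0 : ∀ a, (List.replicate (R + 1) (List.replicate (C + 1) (0 : Int))).getD a []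
      = if a < R + 1 then List.replicate (C + 1) (0 : Int) else [] := by
    intro a
    by_cases h : a < R + 1 <;>
      simp [List.getD_eq_getElem?_getD, h]
  induction k with
  | zero =>
    simp only [List.range'_zero, List.foldl_nil]
    refine ⟨?_, ?_, ?_, ?_⟩
    · intro a; rw [hget0]; split <;> simp
    · intro a ha b hb
      interval_cases a
      simp [dpGet, Ps]
    · intro a _ b
      unfold dpGet
      rw [hget0]
      split <;> simp
    · intro a ha
      rw [hget0, if_pos (by omega)]
      simp
  | succ k ih =>
    obtain ⟨ih1, ih2, ih3, ih4⟩ := ih (by omega)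
    rw [List.range'_1_concat, List.foldl_append]
    set dpK := (List.range' 1 k).foldl (fun dp i => (List.range' 1 C).foldl (dpStep m i) dp)
      (List.replicate (R + 1) (List.replicate (C + 1) (0 : Int))) with hdpK
    simp only [List.foldl_cons, List.foldl_nil]
    have e1 : 1 + k = k + 1 := by omega
    rw [e1]
    obtain ⟨s1, s2, s3, s4, s5⟩ := inner_inv m C k C dpK ih1 (le_refl C)
      (ih4 (k + 1) (by omega)) (fun b hb => ih2 k (le_refl k) b hb)
      (fun b => ih3 (k + 1) (by omega) b)
    refine ⟨s1, ?_, ?_, ?_⟩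
    · intro a ha b hb
      by_cases hak : a = k + 1
      · subst hak; exact s3 b hb
      · rw [s2 a b hak]; exact ih2 a (by omega) b hb
    · intro a ha b
      rw [s2 a b (by omega)]; exact ih3 a (by omega) b
    · intro a ha
      rw [s5 a]; exact ih4 a ha

theorem minStep_some (m c : Int) : minStep (some m) c = some (min m c) := by
  simp only [minStep, min_def]
  split_ifs <;> (try rfl) <;> omega

theorem foldl_minStep_some (t : List Int) (x : Int) :
    t.foldl minStep (some x) = some (t.foldl min x) := by
  induction t generalizing x with
  | nil => rfl
  | cons y t ih => simp [minStep_some, ih]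

-- the running 'if cur < min_sum' loop from none IS Python's min() of the list
theorem foldl_minStep_min? (l : List Int) :
    l.foldl minStep none = PySem.List.min? l (fun x => x) := by
  cases l with
  | nil => rfl
  | cons x t =>
    rw [PySem.List.min?_id_cons]
    simpa [minStep] using foldl_minStep_some t x

theorem main_eq (matrix : List (List Int)) :
    find_min_sum_subarray matrix = find_min_sum_subarray_alt matrix := by
  simp only [find_min_sum_subarray, find_min_sum_subarray_alt]
  by_cases hg : matrix.length < 3 ∨ (matrix.headD []).length < 3
  · rw [if_pos hg, if_pos hg]
  · rw [if_neg hg, if_neg hg]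
    rw [not_or, not_lt, not_lt] at hg
    obtain ⟨hR, hC⟩ := hg
    set R := matrix.length with hRdef
    set C := (matrix.headD []).length with hCdef
    obtain ⟨-, corr, -, -⟩ := outer_inv matrix R C R (le_refl R)
    set dpF := (List.range' 1 R).foldl (fun dp i => (List.range' 1 C).foldl (dpStep matrix i) dp)
      (List.replicate (R + 1) (List.replicate (C + 1) (0 : Int))) with hdpF
    simp only [List.range'_eq_map_range, List.foldl_map]
    have step1 : (List.range (R - 2)).foldl (fun ms i =>
        (List.range (C - 2)).foldl (fun ms j =>
          minStep ms (dpGet dpF (3 + i) (3 + j) - dpGet dpF (3 + i - 3) (3 + j)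
            - dpGet dpF (3 + i) (3 + j - 3) + dpGet dpF (3 + i - 3) (3 + j - 3))) ms) none
        = (List.range (R - 2)).foldl (fun ms i =>
        (List.range (C - 2)).foldl (fun ms j =>
          minStep ms (windowSum matrix i j)) ms) none := by
      apply List.foldl_ext
      intro ms i hi
      apply List.foldl_ext
      intro ms' j hj
      have hi' : i < R - 2 := List.mem_range.mp hi
      have hj' : j < C - 2 := List.mem_range.mp hj
      have e1 : 3 + i - 3 = i := by omega
      have e2 : 3 + j - 3 = j := by omega
      rw [e1, e2,
          corr (3 + i) (by omega) (3 + j) (by omega),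
          corr i (by omega) (3 + j) (by omega),
          corr (3 + i) (by omega) j (by omega),
          corr i (by omega) j (by omega),
          show 3 + i = i + 3 from by omega, show 3 + j = j + 3 from by omega,
          window_eq]
    rw [step1]
    have step2 : ((List.range (R - 2)).flatMap (fun i =>
        (List.range (C - 2)).map (fun j => windowSum matrix i j))).foldl minStep none
        = (List.range (R - 2)).foldl (fun ms i =>
          (List.range (C - 2)).foldl (fun ms j => minStep ms (windowSum matrix i j)) ms) none := by
      rw [List.foldl_flatMap]
      simp only [List.foldl_map]
    rw [← step2, foldl_minStep_min?]

-- ===== VERDICT (by name: the statement is the Claim_ definition above) =====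
theorem find_min_sum_subarray_spec : Claim_equal_find_min_sum_subarray := by
  intro matrix _ _
  unfold Spec_find_min_sum_subarray
  exact main_eq matrix
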